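-- pv_equiv track=rewrite | github.com/mackarovak/cvadratury | Music/открытые решения/algoritm/tasks_about_massiv/massiv3.py | min_queue
-- ===== SOURCE A (Python) =====
-- def min_queue(stroka):
--     count = 0
--     queue = 0
--
--     for i in range(len(stroka)):
--         if stroka[i] == '0':
--             queue += 1
--         else:
--             if queue == 0:
--                 count += 1
--             else:
--                 queue -= 1
--
--     return count
-- ===== SOURCE B (Python) =====
-- def min_queue(stroka):
--     balance = 0
--     lowest = 0
--     for ch in stroka:
--         balance += 1 if ch == '0' else -1
--         if balance < lowest:
--             lowest = balance
--     return -lowest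
-- ===== Notes on version B (the rewrite author's own statement) =====
-- stated objective: simpler
-- what changed: Replaces the greedy clamp-at-zero queue with an unclamped running balance whose prefix minimum is negated at the end.
import Mathlib
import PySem

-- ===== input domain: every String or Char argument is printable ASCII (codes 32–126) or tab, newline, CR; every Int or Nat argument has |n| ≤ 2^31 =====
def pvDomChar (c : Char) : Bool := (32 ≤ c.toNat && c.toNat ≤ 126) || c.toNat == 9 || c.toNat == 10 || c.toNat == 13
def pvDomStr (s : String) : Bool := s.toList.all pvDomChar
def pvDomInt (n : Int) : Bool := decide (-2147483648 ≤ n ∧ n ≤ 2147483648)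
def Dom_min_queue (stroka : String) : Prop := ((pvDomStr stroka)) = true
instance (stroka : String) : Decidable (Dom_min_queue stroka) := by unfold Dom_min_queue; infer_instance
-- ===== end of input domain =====

-- B replaces A's clamp-at-zero queue with an unclamped running balance and its prefix minimum (simpler).


-- ===== PORT A =====
-- loop state: (count, queue)
def min_queue_loop (cs : List Char) (count queue : Int) : Int × Int :=
  match cs with
  | [] => (count, queue)
  | c :: rest =>
    if c = '0' then min_queue_loop rest count (queue + 1)
    else if queue = 0 then min_queue_loop rest (count + 1) queue
    else min_queue_loop rest count (queue - 1)

def min_queue (stroka : String) : Int :=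
  (min_queue_loop stroka.toList 0 0).1

-- ===== PORT B =====
-- loop state: (balance, lowest)
def min_queue_alt_loop (cs : List Char) (balance lowest : Int) : Int :=
  match cs with
  | [] => lowest
  | c :: rest =>
    let b := balance + (if c = '0' then 1 else -1)
    min_queue_alt_loop rest b (if b < lowest then b else lowest)

def min_queue_alt (stroka : String) : Int :=
  - (min_queue_alt_loop stroka.toList 0 0)

-- ===== PRECONDITION & SPEC =====
def Spec_min_queue (stroka : String) (out : Int) : Prop := out = min_queue_alt stroka
instance (stroka : String) (out : Int) : Decidable (Spec_min_queue stroka out) := by unfold Spec_min_queue; infer_instance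

-- ===== CLAIM (what is proved, stated in full; the proofs are below) =====
def Claim_equal_min_queue : Prop := ∀ (stroka : String), Dom_min_queue stroka → Spec_min_queue stroka (min_queue stroka)

-- ===== LEMMAS AND PROOFS =====
-- Invariant: if count = -lowest and queue = balance - lowest (with queue ≥ 0, lowest ≤ balance),
-- then A's final count equals the negation of B's final minimum.
theorem min_queue_invariant (cs : List Char) (balance lowest : Int)
    (hle : lowest ≤ balance) :
    (min_queue_loop cs (-lowest) (balance - lowest)).1 =
      - (min_queue_alt_loop cs balance lowest) := by
  induction cs generalizing balance lowest with
  | nil => simp [min_queue_loop, min_queue_alt_loop]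
  | cons c rest ih =>
    by_cases h0 : c = '0'
    · have hnl : ¬ (balance + 1 < lowest) := by omega
      have L : min_queue_loop (c :: rest) (-lowest) (balance - lowest)
          = min_queue_loop rest (-lowest) (balance - lowest + 1) := by
        simp [min_queue_loop, h0]
      have R : min_queue_alt_loop (c :: rest) balance lowest
          = min_queue_alt_loop rest (balance + 1) lowest := by
        simp [min_queue_alt_loop, h0, hnl]
      rw [L, R, show balance - lowest + 1 = balance + 1 - lowest from by ring]
      exact ih (balance + 1) lowest (by omega)
    · by_cases hq : balance = lowest
      · have L : min_queue_loop (c :: rest) (-lowest) (balance - lowest)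
            = min_queue_loop rest (-lowest + 1) (balance - lowest) := by
          simp [min_queue_loop, h0, show balance - lowest = 0 from by omega]
        have R : min_queue_alt_loop (c :: rest) balance lowest
            = min_queue_alt_loop rest (balance - 1) (balance - 1) := by
          simp only [min_queue_alt_loop, if_neg h0]
          rw [if_pos (by omega : balance + -1 < lowest)]
          congr 1
        rw [L, R, show -lowest + 1 = -(balance - 1) from by omega,
            show balance - lowest = balance - 1 - (balance - 1) from by omega]
        exact ih (balance - 1) (balance - 1) le_rfl
      · have L : min_queue_loop (c :: rest) (-lowest) (balance - lowest)
            = min_queue_loop rest (-lowest) (balance - lowest - 1) := by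
          simp [min_queue_loop, h0, show balance - lowest ≠ 0 from by omega]
        have R : min_queue_alt_loop (c :: rest) balance lowest
            = min_queue_alt_loop rest (balance - 1) lowest := by
          simp only [min_queue_alt_loop, if_neg h0]
          rw [if_neg (by omega : ¬ (balance + -1 < lowest))]
          congr 1
        rw [L, R, show balance - lowest - 1 = balance - 1 - lowest from by ring]
        exact ih (balance - 1) lowest (by omega)

-- ===== VERDICT (by name: the statement is the Claim_ definition above) =====
theorem min_queue_spec : Claim_equal_min_queue := by
  intro stroka _
  unfold Spec_min_queue min_queue min_queue_alt
  have := min_queue_invariant stroka.toList 0 0 (le_refl 0)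
  simpa using this
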